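-- pv_equiv track=rewrite | github.com/eshun4/Data-Structures-and-Algorithms-in-Python-2024 | Dynamic Programming/1D/Classic_SUPW.py | minimumTotalTime
-- ===== SOURCE A (Python) =====
-- from typing import List
--
-- def minimumTotalTime(time: List[int]) -> int:
--     # Get the length of the elements in the array
--     n = len(time)
--
--     if n == 0:
--         return 0
--     elif n == 1:
--         return time[0]
--     elif n == 2:
--         return min(time[0], time[1])
--
--     # Create a dp table
--     dp = [0] * n
--
--     # Base cases
--     dp[0] = time[0]
--     dp[1] = time[1]
--     dp[2] = time[2]
--
--     # Fill the dp table
--     for i in range(3, n):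
--         dp[i] = min(dp[i - 1], dp[i - 2], dp[i - 3]) + time[i]
--
--     # Return the minimum of the last three days
--     return min(dp[n - 1], dp[n - 2], dp[n - 3])
-- ===== SOURCE B (Python) =====
-- from typing import List
--
-- def minimumTotalTime(time: List[int]) -> int:
--     n = len(time)
--     if n == 0:
--         return 0
--     if n == 1:
--         return time[0]
--     if n == 2:
--         return min(time[0], time[1])
--     # Duality: minimizing the time worked equals the total time minus the
--     # MAXIMUM time that can be skipped, where skipped days may never occur
--     # 3 in a row.  skip[i] = best sum of skipped days among days 0..i-1,
--     # given that day i is worked.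
--     skip = [0, time[0], time[0] + time[1]]
--     for i in range(3, n):
--         skip.append(max(skip[i - 1],
--                         skip[i - 2] + time[i - 1],
--                         skip[i - 3] + time[i - 2] + time[i - 1]))
--     # The last worked day must be one of the final three days.
--     best_skipped = max(skip[n - 1],
--                        skip[n - 2] + time[n - 1],
--                        skip[n - 3] + time[n - 2] + time[n - 1])
--     return sum(time) - best_skipped
-- ===== Notes on version B (the rewrite author's own statement) =====
-- stated objective: alternative
-- what changed: B solves the dual problem: instead of A's min-DP over costs of worked days, it computes the maximum total time skippable with never 3 skips in a row (a max-DP over shifted indices, built by appending) and returns sum(time) minus that maximum.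
import Mathlib
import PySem

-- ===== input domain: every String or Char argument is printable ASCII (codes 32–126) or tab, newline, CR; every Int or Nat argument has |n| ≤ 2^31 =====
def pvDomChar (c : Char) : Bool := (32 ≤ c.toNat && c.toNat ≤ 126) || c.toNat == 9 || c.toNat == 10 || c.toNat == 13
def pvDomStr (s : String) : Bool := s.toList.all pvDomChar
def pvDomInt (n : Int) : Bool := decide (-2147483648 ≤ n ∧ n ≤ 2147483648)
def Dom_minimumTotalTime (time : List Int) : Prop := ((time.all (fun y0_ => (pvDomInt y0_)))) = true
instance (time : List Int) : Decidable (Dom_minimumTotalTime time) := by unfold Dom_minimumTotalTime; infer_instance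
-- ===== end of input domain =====

-- B solves the dual problem: sum(time) minus the maximum total time skippable with never 3 skips in a row, instead of A's min-DP over worked days; equal return value proved below.

-- ===== PORT A =====
-- one step of A's "for i in range(3, n)" loop: dp[i] = min(dp[i-1], dp[i-2], dp[i-3]) + time[i]
def pvStepA (time : List Int) (dp : List Int) (i : Nat) : List Int :=
  dp.set i (min (min (dp.getD (i - 1) 0) (dp.getD (i - 2) 0)) (dp.getD (i - 3) 0) + time.getD i 0)

def minimumTotalTime (time : List Int) : Int :=
  let n := time.length
  if n = 0 then 0
  else if n = 1 then time.getD 0 0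
  else if n = 2 then min (time.getD 0 0) (time.getD 1 0)
  else
    -- dp = [0]*n; dp[0]=time[0]; dp[1]=time[1]; dp[2]=time[2]
    let dp0 := (((List.replicate n (0 : Int)).set 0 (time.getD 0 0)).set 1 (time.getD 1 0)).set 2 (time.getD 2 0)
    let dp := (List.range' 3 (n - 3)).foldl (pvStepA time) dp0
    min (min (dp.getD (n - 1) 0) (dp.getD (n - 2) 0)) (dp.getD (n - 3) 0)

-- ===== PORT B =====
-- one step of B's loop: skip.append(max(skip[i-1], skip[i-2]+time[i-1], skip[i-3]+time[i-2]+time[i-1]))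
def pvStepB (time : List Int) (l : List Int) (i : Nat) : List Int :=
  l ++ [max (max (l.getD (i - 1) 0) (l.getD (i - 2) 0 + time.getD (i - 1) 0))
            (l.getD (i - 3) 0 + time.getD (i - 2) 0 + time.getD (i - 1) 0)]

def minimumTotalTime_alt (time : List Int) : Int :=
  let n := time.length
  if n = 0 then 0
  else if n = 1 then time.getD 0 0
  else if n = 2 then min (time.getD 0 0) (time.getD 1 0)
  else
    -- skip = [0, time[0], time[0] + time[1]]; for i in range(3, n): skip.append(...)
    let skip := (List.range' 3 (n - 3)).foldl (pvStepB time)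
                  [0, time.getD 0 0, time.getD 0 0 + time.getD 1 0]
    let bestSkipped := max (max (skip.getD (n - 1) 0) (skip.getD (n - 2) 0 + time.getD (n - 1) 0))
                           (skip.getD (n - 3) 0 + time.getD (n - 2) 0 + time.getD (n - 1) 0)
    time.sum - bestSkipped

-- ===== PRECONDITION & SPEC =====
def Spec_minimumTotalTime (time : List Int) (out : Int) : Prop := out = minimumTotalTime_alt time
instance (time : List Int) (out : Int) : Decidable (Spec_minimumTotalTime time out) := by unfold Spec_minimumTotalTime; infer_instance

-- ===== CLAIM (what is proved, stated in full; the proofs are below) =====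
def Claim_equal_minimumTotalTime : Prop := ∀ (time : List Int), Dom_minimumTotalTime time → Spec_minimumTotalTime time (minimumTotalTime time)

-- ===== LEMMAS AND PROOFS =====

-- the min-DP recurrence A computes: pvDpf i = minimal cost of a valid schedule with day i worked
def pvDpf (time : List Int) : Nat → Int
  | 0 => time.getD 0 0
  | 1 => time.getD 1 0
  | 2 => time.getD 2 0
  | (i + 3) => min (min (pvDpf time (i + 2)) (pvDpf time (i + 1))) (pvDpf time i) + time.getD (i + 3) 0

-- the max-DP recurrence B computes: pvSkip i = maximal sum skippable among days 0..i-1 with day i worked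
def pvSkip (time : List Int) : Nat → Int
  | 0 => 0
  | 1 => time.getD 0 0
  | 2 => time.getD 0 0 + time.getD 1 0
  | (i + 3) => max (max (pvSkip time (i + 2)) (pvSkip time (i + 1) + time.getD (i + 2) 0))
                   (pvSkip time i + time.getD (i + 1) 0 + time.getD (i + 2) 0)

-- prefix sum of the first i+1 entries
def pvP (time : List Int) (i : Nat) : Int := (time.take (i + 1)).sum

lemma pvP_succ (time : List Int) (i : Nat) :
    pvP time (i + 1) = pvP time i + time.getD (i + 1) 0 := by
  unfold pvP
  rw [List.take_succ, List.sum_append]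
  cases h : time[i + 1]? with
  | none => simp [List.getD, h]
  | some a => simp [List.getD, h]

lemma pvP_zero (time : List Int) : pvP time 0 = time.getD 0 0 := by
  cases time <;> simp [pvP]

-- DUALITY: cost of working day i plus the best skip total up to day i is the whole prefix sum
lemma pvDpf_add_pvSkip (time : List Int) : ∀ i, pvDpf time i + pvSkip time i = pvP time i := by
  intro i
  induction i using Nat.strong_induction_on with
  | _ i ih =>
    match i with
    | 0 => simp [pvDpf, pvSkip, pvP_zero]
    | 1 =>
      simp only [pvDpf, pvSkip]
      rw [show (1 : Nat) = 0 + 1 from rfl, pvP_succ, pvP_zero]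
      ring
    | 2 =>
      simp only [pvDpf, pvSkip]
      rw [show (2 : Nat) = 0 + 1 + 1 from rfl, pvP_succ, pvP_succ, pvP_zero]
      ring
    | (i + 3) =>
      have h0 := ih i (by omega)
      have h1 := ih (i + 1) (by omega)
      have h2 := ih (i + 2) (by omega)
      have p1 := pvP_succ time i
      have p2 := pvP_succ time (i + 1)
      have p3 := pvP_succ time (i + 2)
      rw [show i + 1 + 1 = i + 2 by omega] at p2
      rw [show i + 2 + 1 = i + 3 by omega] at p3
      simp only [pvDpf, pvSkip]
      omega

lemma pvFoldA_len (time dp0 : List Int) (l : List Nat) :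
    ((l.foldl (pvStepA time) dp0)).length = dp0.length := by
  induction l generalizing dp0 with
  | nil => rfl
  | cons i l ih => simp [List.foldl, pvStepA, ih]

lemma pvGetD_set (dp : List Int) (i j : Nat) (v : Int) :
    (dp.set i v).getD j 0 = if j = i ∧ i < dp.length then v else dp.getD j 0 := by
  rcases Nat.lt_or_ge i dp.length with h | h
  · rcases eq_or_ne j i with rfl | hne
    · simp [List.getD, h]
    · simp [List.getD, List.getElem?_set_ne (by omega : i ≠ j), hne]
  · rw [List.set_eq_of_length_le h, if_neg (by rintro ⟨rfl, h2⟩; omega)]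

-- invariant of A's fold: after processing range' 3 m, entry j holds pvDpf j for j < 3+m, 0 otherwise
lemma pvFoldA_inv (time : List Int) (n : Nat) (hn : n = time.length) (h3 : 3 ≤ n)
    (dp0 : List Int) (hlen : dp0.length = n)
    (hinit : ∀ j, dp0.getD j 0 = if j < 3 then pvDpf time j else 0) :
    ∀ m, 3 + m ≤ n → ∀ j,
      ((List.range' 3 m).foldl (pvStepA time) dp0).getD j 0
        = if j < 3 + m then pvDpf time j else 0 := by
  intro m
  induction m with
  | zero => intro _ j; simpa using hinit j
  | succ m ih =>
    intro hm j
    have hm' : 3 + m ≤ n := by omega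
    have ihm := ih hm'
    have hlen' : ((List.range' 3 m).foldl (pvStepA time) dp0).length = n := by
      rw [pvFoldA_len]; exact hlen
    rw [List.range'_1_concat, List.foldl_append]
    simp only [List.foldl_cons, List.foldl_nil, pvStepA]
    rw [pvGetD_set]
    have e1 : (3 + m) - 1 = 2 + m := by omega
    have e2 : (3 + m) - 2 = 1 + m := by omega
    have e3 : (3 + m) - 3 = m := by omega
    rw [e1, e2, e3, ihm (2 + m), ihm (1 + m), ihm m, hlen']
    rw [if_pos (by omega : 2 + m < 3 + m), if_pos (by omega : 1 + m < 3 + m),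
      if_pos (by omega : m < 3 + m)]
    by_cases hj : j = 3 + m
    · subst hj
      rw [if_pos (show (3 + m = 3 + m) ∧ 3 + m < n from ⟨rfl, by omega⟩),
        if_pos (by omega : 3 + m < 3 + (m + 1))]
      have hd : pvDpf time (m + 3)
          = min (min (pvDpf time (m + 2)) (pvDpf time (m + 1))) (pvDpf time m)
              + time.getD (m + 3) 0 := rfl
      rw [show 3 + m = m + 3 by omega, hd, show m + 2 = 2 + m by omega,
        show m + 1 = 1 + m by omega]
    · rw [if_neg (by exact fun hc => hj hc.1), ihm j]
      by_cases hlt : j < 3 + m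
      · rw [if_pos hlt, if_pos (by omega)]
      · rw [if_neg hlt, if_neg (by omega)]

-- the initial dp array agrees with pvDpf on indices 0,1,2 and is 0 elsewhere
lemma pvInit (time : List Int) (h3 : 3 ≤ time.length) (j : Nat) :
    ((((List.replicate time.length (0 : Int)).set 0 (time.getD 0 0)).set 1
        (time.getD 1 0)).set 2 (time.getD 2 0)).getD j 0
      = if j < 3 then pvDpf time j else 0 := by
  rw [pvGetD_set, pvGetD_set, pvGetD_set]
  simp only [List.length_set, List.length_replicate]
  match j with
  | 0 => simp [pvDpf, show (0:Nat) < time.length by omega]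
  | 1 => simp [pvDpf, show (1:Nat) < time.length by omega]
  | 2 => simp [pvDpf, show (2:Nat) < time.length by omega]
  | (j + 3) =>
    simp only [show j + 3 ≠ 0 by omega, show j + 3 ≠ 1 by omega, show j + 3 ≠ 2 by omega,
      false_and, if_false, if_neg (by omega : ¬ j + 3 < 3), List.getD]
    rcases Nat.lt_or_ge (j + 3) time.length with h | h
    · simp [h]
    · simp [List.getElem?_eq_none (l := time) (by simpa using h)]

-- invariant of B's fold: after processing range' 3 m, the appended list is [pvSkip 0, …, pvSkip (3+m-1)]
lemma pvFoldB_inv (time : List Int) : ∀ m,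
    (List.range' 3 m).foldl (pvStepB time) [0, time.getD 0 0, time.getD 0 0 + time.getD 1 0]
      = (List.range (3 + m)).map (pvSkip time) := by
  intro m
  induction m with
  | zero =>
    simp [List.range_succ, pvSkip]
  | succ m ih =>
    rw [List.range'_1_concat, List.foldl_append]
    simp only [List.foldl_cons, List.foldl_nil, ih, pvStepB]
    rw [show (3 + m) - 1 = 2 + m by omega, show (3 + m) - 2 = 1 + m by omega,
      show (3 + m) - 3 = m by omega,
      PySem.List.getD_map_range (pvSkip time) (3 + m) (2 + m) 0 (by omega),
      PySem.List.getD_map_range (pvSkip time) (3 + m) (1 + m) 0 (by omega),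
      PySem.List.getD_map_range (pvSkip time) (3 + m) m 0 (by omega)]
    rw [show 3 + (m + 1) = (3 + m) + 1 by omega, List.range_succ, List.map_append]
    have hs : pvSkip time (3 + m)
        = max (max (pvSkip time (m + 2)) (pvSkip time (m + 1) + time.getD (m + 2) 0))
              (pvSkip time m + time.getD (m + 1) 0 + time.getD (m + 2) 0) := by
      rw [show 3 + m = m + 3 by omega]; rfl
    rw [List.map_cons, List.map_nil, hs, show m + 2 = 2 + m by omega,
      show m + 1 = 1 + m by omega]

-- the full list sum is the prefix sum at the last index
lemma pvSum_eq_pvP (time : List Int) (h : 1 ≤ time.length) :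
    time.sum = pvP time (time.length - 1) := by
  unfold pvP
  rw [show time.length - 1 + 1 = time.length by omega, List.take_length]

-- ===== VERDICT (by name: the statement is the Claim_ definition above) =====
theorem minimumTotalTime_spec : Claim_equal_minimumTotalTime := by
  intro time _
  unfold Spec_minimumTotalTime
  by_cases h0 : time.length = 0
  · simp [minimumTotalTime, minimumTotalTime_alt, h0]
  by_cases h1 : time.length = 1
  · simp [minimumTotalTime, minimumTotalTime_alt, h0, h1]
  by_cases h2 : time.length = 2
  · simp [minimumTotalTime, minimumTotalTime_alt, h0, h1, h2]
  have h3 : 3 ≤ time.length := by omega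
  set n := time.length with hn
  simp only [minimumTotalTime, minimumTotalTime_alt, ← hn, if_neg h0, if_neg h1, if_neg h2]
  -- A's side: the dp entries are pvDpf
  have hlen0 : ((((List.replicate n (0 : Int)).set 0 (time.getD 0 0)).set 1
      (time.getD 1 0)).set 2 (time.getD 2 0)).length = n := by simp
  have hinv := pvFoldA_inv time n hn h3 _ hlen0
    (by rw [hn]; exact pvInit time h3) (n - 3) (by omega)
  have g1 := hinv (n - 1); have g2 := hinv (n - 2); have g3 := hinv (n - 3)
  rw [if_pos (by omega)] at g1 g2 g3
  rw [g1, g2, g3]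
  -- B's side: the skip entries are pvSkip
  have hb := pvFoldB_inv time (n - 3)
  rw [show 3 + (n - 3) = n by omega] at hb
  rw [hb, PySem.List.getD_map_range (pvSkip time) n (n - 1) 0 (by omega),
    PySem.List.getD_map_range (pvSkip time) n (n - 2) 0 (by omega),
    PySem.List.getD_map_range (pvSkip time) n (n - 3) 0 (by omega)]
  -- the duality identity at the last three indices, plus the prefix-sum steps
  have d1 := pvDpf_add_pvSkip time (n - 1)
  have d2 := pvDpf_add_pvSkip time (n - 2)
  have d3 := pvDpf_add_pvSkip time (n - 3)
  have p1 := pvP_succ time (n - 2)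
  have p2 := pvP_succ time (n - 3)
  rw [show n - 2 + 1 = n - 1 by omega] at p1
  rw [show n - 3 + 1 = n - 2 by omega] at p2
  rw [pvSum_eq_pvP time (by omega), ← hn]
  omega
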